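-- pv_equiv track=rewrite | github.com/ragkasi/AEPSafetyObservation | data_processing.py | assign_risk_level
-- ===== SOURCE A (Python) =====
-- def assign_risk_level(text):
--     high_risk_keywords = ['fatal','severe','injury','critical','explosion','fire','death']
--     medium_risk_keywords = ['moderate','slip','trip','fall','accident','shock']
--
--     text = text.lower()
--
--     # Check for high-risk keywords
--     if any(keyword in text for keyword in high_risk_keywords):
--         return 2 # High risk
--     elif any(keyword in text for keyword in medium_risk_keywords):
--         return 1 # Medium risk
--     else:
--         return 0 # Low risk
-- ===== SOURCE B (Python) =====
-- def assign_risk_level(text):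
--     severity = {
--         'fatal': 2, 'severe': 2, 'injury': 2, 'critical': 2,
--         'explosion': 2, 'fire': 2, 'death': 2,
--         'moderate': 1, 'slip': 1, 'trip': 1, 'fall': 1,
--         'accident': 1, 'shock': 1,
--     }
--     t = text.lower()
--     level = 0
--     for keyword, lvl in severity.items():
--         if keyword in t:
--             level = max(level, lvl)
--     return level
-- ===== Notes on version B (the rewrite author's own statement) =====
-- stated objective: alternative
-- what changed: Replaces the two precedence-ordered short-circuit any() checks with one flat keyword->severity table scanned once while accumulating a running maximum level.
import Mathlib
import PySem

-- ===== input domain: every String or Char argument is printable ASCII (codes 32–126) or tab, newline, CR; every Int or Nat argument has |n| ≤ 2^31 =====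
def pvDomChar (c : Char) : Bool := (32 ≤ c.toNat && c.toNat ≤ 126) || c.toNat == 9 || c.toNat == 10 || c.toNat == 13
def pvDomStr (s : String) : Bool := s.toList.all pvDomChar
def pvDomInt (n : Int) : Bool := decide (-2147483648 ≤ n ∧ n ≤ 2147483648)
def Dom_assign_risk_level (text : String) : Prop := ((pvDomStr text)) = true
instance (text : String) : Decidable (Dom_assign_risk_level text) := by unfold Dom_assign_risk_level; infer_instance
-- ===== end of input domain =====

-- B replaces the two precedence-ordered any() checks with one flat keyword->severity
-- table scanned once with a running maximum (alternative decomposition, same cost).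

-- ===== PORT A =====
def assign_risk_level (text : String) : Int :=
  let high_risk_keywords := ["fatal","severe","injury","critical","explosion","fire","death"]
  let medium_risk_keywords := ["moderate","slip","trip","fall","accident","shock"]
  let t := PySem.Str.lower text
  if high_risk_keywords.any (fun keyword => PySem.Str.isIn keyword t) then 2
  else if medium_risk_keywords.any (fun keyword => PySem.Str.isIn keyword t) then 1
  else 0

-- ===== PORT B =====
def assign_risk_level_alt (text : String) : Int :=
  let severity : List (String × Int) :=
    [("fatal",2),("severe",2),("injury",2),("critical",2),("explosion",2),("fire",2),("death",2),
     ("moderate",1),("slip",1),("trip",1),("fall",1),("accident",1),("shock",1)]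
  let t := PySem.Str.lower text
  severity.foldl (fun level kv => if PySem.Str.isIn kv.1 t then max level kv.2 else level) 0

-- ===== PRECONDITION & SPEC =====
def Spec_assign_risk_level (text : String) (out : Int) : Prop := out = assign_risk_level_alt text
instance (text : String) (out : Int) : Decidable (Spec_assign_risk_level text out) := by unfold Spec_assign_risk_level; infer_instance

-- ===== CLAIM (what is proved, stated in full; the proofs are below) =====
def Claim_equal_assign_risk_level : Prop := ∀ (text : String), Dom_assign_risk_level text → Spec_assign_risk_level text (assign_risk_level text)

-- ===== LEMMAS AND PROOFS =====

-- the accumulator never exceeds c when every matching row's level is ≤ c and the start is ≤ c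
lemma pvFold_le (t : String) (l : List (String × Int)) (a c : Int) (ha : a ≤ c)
    (hl : ∀ kv ∈ l, PySem.Str.isIn kv.1 t = true → kv.2 ≤ c) :
    l.foldl (fun level kv => if PySem.Str.isIn kv.1 t then max level kv.2 else level) a ≤ c := by
  induction l generalizing a with
  | nil => simpa
  | cons kv l ih =>
    simp only [List.foldl]
    apply ih
    · by_cases h : PySem.Str.isIn kv.1 t = true
      · rw [if_pos h]; exact max_le ha (hl kv (List.mem_cons_self) h)
      · rw [if_neg h]; exact ha
    · exact fun kv' h' => hl kv' (List.mem_cons_of_mem _ h')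

-- the accumulator only grows
lemma pvFold_ge_start (t : String) (l : List (String × Int)) (a : Int) :
    a ≤ l.foldl (fun level kv => if PySem.Str.isIn kv.1 t then max level kv.2 else level) a := by
  induction l generalizing a with
  | nil => simp
  | cons kv l ih =>
    simp only [List.foldl]
    refine le_trans ?_ (ih _)
    by_cases h : PySem.Str.isIn kv.1 t = true
    · rw [if_pos h]; exact le_max_left _ _
    · rw [if_neg h]

-- a matching row forces the result up to its level
lemma pvFold_ge_match (t : String) (l : List (String × Int)) (a : Int) (kv : String × Int)
    (hmem : kv ∈ l) (hm : PySem.Str.isIn kv.1 t = true) :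
    kv.2 ≤ l.foldl (fun level kv => if PySem.Str.isIn kv.1 t then max level kv.2 else level) a := by
  induction l generalizing a with
  | nil => exact absurd hmem (List.not_mem_nil)
  | cons kv' l ih =>
    simp only [List.foldl]
    rcases List.mem_cons.mp hmem with rfl | h
    · rw [if_pos hm]
      exact le_trans (le_max_right _ _) (pvFold_ge_start t l _)
    · exact ih _ h

-- with no matching row the fold returns its start value
lemma pvFold_none (t : String) (l : List (String × Int)) (a : Int)
    (h : ∀ kv ∈ l, PySem.Str.isIn kv.1 t = false) :
    l.foldl (fun level kv => if PySem.Str.isIn kv.1 t then max level kv.2 else level) a = a := by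
  induction l generalizing a with
  | nil => rfl
  | cons kv l ih =>
    simp only [List.foldl, h kv (List.mem_cons_self)]
    apply ih
    exact fun kv' h' => h kv' (List.mem_cons_of_mem _ h')

-- every table row is a high keyword at level 2 or a medium keyword at level 1
lemma pvTable_shape :
    ∀ kv ∈ ([("fatal",(2:Int)),("severe",2),("injury",2),("critical",2),("explosion",2),("fire",2),("death",2),
        ("moderate",1),("slip",1),("trip",1),("fall",1),("accident",1),("shock",1)]),
      (kv.1 ∈ ["fatal","severe","injury","critical","explosion","fire","death"] ∧ kv.2 = 2) ∨
      (kv.1 ∈ ["moderate","slip","trip","fall","accident","shock"] ∧ kv.2 = 1) := by decide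

-- every high keyword appears in the table at level 2, every medium one at level 1
lemma pvTable_hi :
    ∀ k ∈ ["fatal","severe","injury","critical","explosion","fire","death"],
      (k, (2:Int)) ∈ ([("fatal",(2:Int)),("severe",2),("injury",2),("critical",2),("explosion",2),("fire",2),("death",2),
        ("moderate",1),("slip",1),("trip",1),("fall",1),("accident",1),("shock",1)]) := by decide

lemma pvTable_med :
    ∀ k ∈ ["moderate","slip","trip","fall","accident","shock"],
      (k, (1:Int)) ∈ ([("fatal",(2:Int)),("severe",2),("injury",2),("critical",2),("explosion",2),("fire",2),("death",2),
        ("moderate",1),("slip",1),("trip",1),("fall",1),("accident",1),("shock",1)]) := by decide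

-- ===== VERDICT (by name: the statement is the Claim_ definition above) =====
theorem assign_risk_level_spec : Claim_equal_assign_risk_level := by
  intro text _
  unfold Spec_assign_risk_level
  simp only [assign_risk_level, assign_risk_level_alt]
  by_cases hh : (["fatal","severe","injury","critical","explosion","fire","death"].any
      (fun keyword => PySem.Str.isIn keyword (PySem.Str.lower text))) = true
  · rw [if_pos hh]
    obtain ⟨k, hk, hkin⟩ := List.any_eq_true.mp hh
    refine (le_antisymm ?_ ?_).symm
    · exact pvFold_le _ _ _ _ (by norm_num)
        (fun kv hmem _ => by rcases pvTable_shape kv hmem with ⟨_, h2⟩ | ⟨_, h1⟩ <;> omega)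
    · exact pvFold_ge_match _ _ _ (k, 2) (pvTable_hi k hk) hkin
  · rw [if_neg hh]
    have hhall := List.any_eq_false.mp (Bool.eq_false_iff.mpr hh)
    by_cases hm : (["moderate","slip","trip","fall","accident","shock"].any
        (fun keyword => PySem.Str.isIn keyword (PySem.Str.lower text))) = true
    · rw [if_pos hm]
      obtain ⟨k, hk, hkin⟩ := List.any_eq_true.mp hm
      refine (le_antisymm ?_ ?_).symm
      · refine pvFold_le _ _ _ _ (by norm_num) (fun kv hmem hin => ?_)
        rcases pvTable_shape kv hmem with ⟨hmemhi, _⟩ | ⟨_, h1⟩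
        · exact absurd hin (hhall kv.1 hmemhi)
        · omega
      · exact pvFold_ge_match _ _ _ (k, 1) (pvTable_med k hk) hkin
    · rw [if_neg hm]
      have hmall := List.any_eq_false.mp (Bool.eq_false_iff.mpr hm)
      refine (pvFold_none _ _ _ (fun kv hmem => ?_)).symm
      rcases pvTable_shape kv hmem with ⟨hmemhi, _⟩ | ⟨hmemmed, _⟩
      · exact Bool.eq_false_iff.mpr (hhall kv.1 hmemhi)
      · exact Bool.eq_false_iff.mpr (hmall kv.1 hmemmed)
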